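-- pv_equiv track=rewrite | github.com/juy4556/PythonAlgorithm | 잡동/ne/4.py | reachTheEnd
-- ===== SOURCE A (Python) =====
-- from collections import deque
--
-- dx = [-1, 0, 1, 0]
--
-- dy = [0, 1, 0, -1]
--
-- def reachTheEnd(grid, maxTime):
--     q = deque()
--     q.append([0, 0, 0])
--     visited = [[0 for _ in range(len(grid[0]))] for _ in range(len(grid))]
--     while q:
--         x, y, c = q.popleft()
--         if x == len(grid) - 1 and y == len(grid[0]) - 1:
--             if c <= maxTime:
--                 return "Yes"
--             else:
--                 return "No"
--         for d in range(4):
--             nx = x + dx[d]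
--             ny = y + dy[d]
--             if nx < 0 or nx > len(grid) - 1 or ny < 0 or ny > len(grid[0]) - 1 or grid[nx][ny] == '#':
--                 continue
--             if not visited[nx][ny]:
--                 visited[nx][ny] = 1
--                 q.append([nx, ny, c + 1])
--     return "No"
-- ===== SOURCE B (Python) =====
-- def reachTheEnd(grid, maxTime):
--     rows, cols = len(grid), len(grid[0])
--     reach = [[i == 0 and j == 0 for j in range(cols)] for i in range(rows)]
--     k = 0
--     while True:
--         if reach[rows - 1][cols - 1]:
--             return "Yes" if k <= maxTime else "No"
--         nxt = [[reach[i][j] or (grid[i][j] != '#' and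
--                 ((i > 0 and reach[i - 1][j]) or (j + 1 < cols and reach[i][j + 1]) or
--                  (i + 1 < rows and reach[i + 1][j]) or (j > 0 and reach[i][j - 1])))
--                 for j in range(cols)] for i in range(rows)]
--         if nxt == reach:
--             return "No"
--         reach = nxt
--         k += 1
-- ===== Notes on version B (the rewrite author's own statement) =====
-- stated objective: alternative
-- what changed: Replaces A's queue-based BFS (deque of [x,y,dist] nodes plus a visited matrix) with a queue-free iterated boolean relaxation: a whole-grid 'reachable' matrix is repeatedly recomputed as R[i][j] |= non-wall and some neighbour reachable, checking the end cell each round and stopping at a fixpoint; correct because round k's matrix is exactly the set of cells at BFS distance <= k.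
-- outside the precondition, e.g. on reachTheEnd([], 0): A returns 'No', B raises IndexError; on reachTheEnd([''], 0): A returns 'No', B raises IndexError; on reachTheEnd(['.#', '#'], 0): A returns 'No', B raises IndexError
import Mathlib
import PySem

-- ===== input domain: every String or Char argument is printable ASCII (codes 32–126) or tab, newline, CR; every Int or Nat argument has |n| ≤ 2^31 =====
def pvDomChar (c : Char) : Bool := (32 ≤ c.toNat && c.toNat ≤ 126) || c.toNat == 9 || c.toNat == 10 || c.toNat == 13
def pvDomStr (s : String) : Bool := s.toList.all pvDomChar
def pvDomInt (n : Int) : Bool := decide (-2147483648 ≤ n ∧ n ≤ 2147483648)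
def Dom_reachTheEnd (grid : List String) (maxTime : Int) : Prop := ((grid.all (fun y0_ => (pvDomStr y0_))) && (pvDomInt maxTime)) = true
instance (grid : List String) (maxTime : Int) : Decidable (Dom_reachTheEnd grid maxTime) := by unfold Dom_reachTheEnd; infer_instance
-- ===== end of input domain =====

-- B replaces A's queue-based BFS by a queue-free iterated boolean relaxation (a whole-grid
-- reachability matrix recomputed until the end cell turns true or a fixpoint is reached);
-- objective: a genuinely different algorithm, not speed.

-- shared small accessors (Python's grid[nx][ny], visited[nx][ny], visited[nx][ny] = 1;
-- exact on in-bounds non-negative indices, which is the only way the ports reach them)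
def pvCell (grid : List String) (nx ny : Int) : Char :=
  ((grid.getD nx.toNat "").toList).getD ny.toNat ' '

def pvVisGet (v : List (List Int)) (nx ny : Int) : Int :=
  (v.getD nx.toNat []).getD ny.toNat 0

def pvVisSet (v : List (List Int)) (nx ny : Int) : List (List Int) :=
  v.modify nx.toNat (fun row => row.set ny.toNat 1)

-- ===== PORT A =====
def pvDx : List Int := [-1, 0, 1, 0]
def pvDy : List Int := [0, 1, 0, -1]

-- body of A's `for d in range(4)` loop: fold one direction index over (queue, visited)
def pvStepA (grid : List String) (rows cols x y c : Int)
    (st : List (Int × Int × Int) × List (List Int)) (d : Nat) :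
    List (Int × Int × Int) × List (List Int) :=
  let nx := x + pvDx.getD d 0
  let ny := y + pvDy.getD d 0
  if nx < 0 ∨ nx > rows - 1 ∨ ny < 0 ∨ ny > cols - 1 ∨ pvCell grid nx ny = '#' then st
  else if ¬ (pvVisGet st.2 nx ny = 0) then st
  else (st.1 ++ [(nx, ny, c + 1)], pvVisSet st.2 nx ny)

-- A's `while q:` loop (fueled; the caller passes rows*cols+2 fuel, which the proof shows
-- is never exhausted before the queue empties or the function returns)
def pvLoopA (grid : List String) (rows cols maxTime : Int) :
    Nat → List (Int × Int × Int) → List (List Int) → String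
  | 0, _, _ => "No"
  | _ + 1, [], _ => "No"
  | fuel + 1, (x, y, c) :: q, visited =>
    if x = rows - 1 ∧ y = cols - 1 then (if c ≤ maxTime then "Yes" else "No")
    else
      let st := (List.range 4).foldl (pvStepA grid rows cols x y c) (q, visited)
      pvLoopA grid rows cols maxTime fuel st.1 st.2

def reachTheEnd (grid : List String) (maxTime : Int) : String :=
  let rowsN := grid.length
  let colsN := (grid.headD "").length
  let visited := (List.range rowsN).map (fun _ => (List.range colsN).map (fun _ => (0 : Int)))
  pvLoopA grid (rowsN : Int) (colsN : Int) maxTime (rowsN * colsN + 2) [(0, 0, 0)] visited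

-- ===== PORT B =====
-- Python's reach[i][j] on the boolean matrix (indices are always in range in Source B)
def pvRAt (R : List (List Bool)) (i j : Nat) : Bool := (R.getD i []).getD j false

-- Source B's `nxt = [[reach[i][j] or (grid[i][j] != '#' and (... neighbour reachable ...))]]`
def pvStepJ (grid : List String) (rows cols : Nat) (R : List (List Bool)) : List (List Bool) :=
  (List.range rows).map (fun i => (List.range cols).map (fun j =>
    pvRAt R i j ||
      (decide (¬ pvCell grid (i : Int) (j : Int) = '#') &&
        ((decide (0 < i) && pvRAt R (i - 1) j) ||
         (decide (j + 1 < cols) && pvRAt R i (j + 1)) ||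
         (decide (i + 1 < rows) && pvRAt R (i + 1) j) ||
         (decide (0 < j) && pvRAt R i (j - 1))))))

-- Source B's `while True:` loop (fueled; rows*cols+2 fuel suffices, shown by the proof)
def pvLoopJ (grid : List String) (rows cols : Nat) (maxTime : Int) :
    Nat → List (List Bool) → Int → String
  | 0, _, _ => "No"
  | f + 1, R, k =>
    if pvRAt R (rows - 1) (cols - 1) then (if k ≤ maxTime then "Yes" else "No")
    else
      let nxt := pvStepJ grid rows cols R
      if nxt = R then "No" else pvLoopJ grid rows cols maxTime f nxt (k + 1)

def reachTheEnd_alt (grid : List String) (maxTime : Int) : String :=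
  let rows := grid.length
  let cols := (grid.headD "").length
  let R0 := (List.range rows).map (fun i => (List.range cols).map (fun j => decide (i = 0 ∧ j = 0)))
  pvLoopJ grid rows cols maxTime (rows * cols + 2) R0 0

-- ===== PRECONDITION & SPEC =====
-- Pre_ excludes grids on which Python list indexing can raise IndexError: the empty grid and a
-- grid whose first row is empty (A returns "No" on both because its bounds checks short-circuit
-- every access, while B's whole-grid sweep reads reach[rows-1][cols-1] resp. grid cells and
-- raises), and ragged grids with a row shorter than row 0 (A raises IndexError once BFS steps
-- beside a short row; B's sweep always reads every cell and raises; on short rows BFS never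
-- reaches, A returns "No" while B still raises).
def Pre_reachTheEnd (grid : List String) (maxTime : Int) : Prop :=
  grid ≠ [] ∧ 0 < (grid.headD "").length ∧ ∀ row ∈ grid, (grid.headD "").length ≤ row.length
instance (grid : List String) (maxTime : Int) : Decidable (Pre_reachTheEnd grid maxTime) := by
  unfold Pre_reachTheEnd; infer_instance

def pvWitness_reachTheEnd : List String × Int := (["..", ".#"], 5)

def Spec_reachTheEnd (grid : List String) (maxTime : Int) (out : String) : Prop :=
  out = reachTheEnd_alt grid maxTime
instance (grid : List String) (maxTime : Int) (out : String) : Decidable (Spec_reachTheEnd grid maxTime out) := by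
  unfold Spec_reachTheEnd; infer_instance

-- ===== CLAIM (what is proved, stated in full; the proofs are below) =====
def Claim_equal_reachTheEnd : Prop := ∀ (grid : List String) (maxTime : Int), Dom_reachTheEnd grid maxTime → Pre_reachTheEnd grid maxTime → Spec_reachTheEnd grid maxTime (reachTheEnd grid maxTime)

-- ===== LEMMAS AND PROOFS =====

-- ---------- proof-side level-synchronous BFS loop (intermediate between A and B) ----------
def pvNbrs : List (Int × Int) := [(-1, 0), (0, 1), (1, 0), (0, -1)]

def pvStepB (grid : List String) (rows cols x y : Int)
    (st : List (Int × Int) × List (List Int)) (d : Int × Int) :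
    List (Int × Int) × List (List Int) :=
  let nx := x + d.1
  let ny := y + d.2
  if 0 ≤ nx ∧ nx < rows ∧ 0 ≤ ny ∧ ny < cols ∧ ¬ pvCell grid nx ny = '#' ∧ pvVisGet st.2 nx ny = 0 then
    (st.1 ++ [(nx, ny)], pvVisSet st.2 nx ny)
  else st

def pvInnerB (grid : List String) (rows cols maxTime c : Int) :
    List (Int × Int) → List (Int × Int) → List (List Int) →
    Sum String (List (Int × Int) × List (List Int))
  | [], next, visited => .inr (next, visited)
  | (x, y) :: rest, next, visited =>
    if x = rows - 1 ∧ y = cols - 1 then .inl (if c ≤ maxTime then "Yes" else "No")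
    else
      let st := pvNbrs.foldl (pvStepB grid rows cols x y) (next, visited)
      pvInnerB grid rows cols maxTime c rest st.1 st.2

def pvOuterB (grid : List String) (rows cols maxTime : Int) :
    Nat → List (Int × Int) → Int → List (List Int) → String
  | 0, _, _, _ => "No"
  | fuel + 1, frontier, c, visited =>
    if frontier = [] then "No"
    else
      match pvInnerB grid rows cols maxTime c frontier [] visited with
      | .inl s => s
      | .inr (next, vis) => pvOuterB grid rows cols maxTime fuel next (c + 1) vis

-- attach a level to every frontier cell (A's queue = tagged frontiers)
def pvTag (c : Int) (l : List (Int × Int)) : List (Int × Int × Int) :=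
  l.map (fun p => (p.1, p.2, c))

-- the visited matrix keeps its rows×cols shape
def pvShape (rowsN colsN : Nat) (v : List (List Int)) : Prop :=
  v.length = rowsN ∧ ∀ r ∈ v, r.length = colsN

-- number of zero entries of one row / of the matrix
def pvRowZ (r : List Int) : Nat := r.countP (fun a => a = 0)
def pvZ (v : List (List Int)) : Nat := (v.map pvRowZ).sum

-- B's continuation from the middle of a level scan
def pvContB (grid : List String) (rows cols maxTime : Int) (fB : Nat) (c : Int)
    (front next : List (Int × Int)) (visited : List (List Int)) : String :=
  match pvInnerB grid rows cols maxTime c front next visited with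
  | .inl s => s
  | .inr (nx, vv) => pvOuterB grid rows cols maxTime fB nx (c + 1) vv

theorem pvRowZ_set (r : List Int) (j : Nat) (hj : j < r.length) (h0 : r.getD j 0 = 0) :
    pvRowZ (r.set j 1) + 1 = pvRowZ r := by
  induction r generalizing j with
  | nil => simp at hj
  | cons a t ih =>
    cases j with
    | zero => simp_all [pvRowZ, List.countP_cons]
    | succ j =>
      simp only [List.length_cons, Nat.succ_lt_succ_iff] at hj
      simp only [List.getD_cons_succ] at h0
      have := ih j hj h0
      simp [pvRowZ, List.countP_cons] at this ⊢
      omega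

theorem pvZ_modify (v : List (List Int)) (i : Nat) (f : List Int → List Int) (hi : i < v.length) :
    pvZ (v.modify i f) + pvRowZ (v.getD i []) = pvZ v + pvRowZ (f (v.getD i [])) := by
  induction v generalizing i with
  | nil => simp at hi
  | cons r t ih =>
    cases i with
    | zero => simp [pvZ, List.modify_cons]; omega
    | succ i =>
      simp only [List.length_cons, Nat.succ_lt_succ_iff] at hi
      have := ih i hi
      simp [pvZ, List.modify_cons] at this ⊢
      omega

theorem pvRows_modify_set (colsN j : Nat) (v : List (List Int)) (i : Nat)
    (h2 : ∀ r ∈ v, r.length = colsN) :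
    ∀ r ∈ v.modify i (fun row => row.set j 1), r.length = colsN := by
  induction v generalizing i with
  | nil => simp
  | cons r t ih =>
    cases i with
    | zero =>
      intro s hsm
      rw [List.modify_cons] at hsm
      rcases List.mem_cons.mp hsm with h | h
      · subst h; simpa using h2 r (by simp)
      · exact h2 s (by simp [h])
    | succ i =>
      intro s hsm
      rw [List.modify_cons] at hsm
      rcases List.mem_cons.mp hsm with h | h
      · exact h2 s (by simp [h])
      · exact ih i (fun u hu => h2 u (by simp [hu])) s h

theorem pvShape_modify (rowsN colsN : Nat) (v : List (List Int)) (i j : Nat)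
    (hs : pvShape rowsN colsN v) :
    pvShape rowsN colsN (v.modify i (fun row => row.set j 1)) :=
  ⟨by simp [List.length_modify, hs.1], pvRows_modify_set colsN j v i hs.2⟩

-- one visited mark: shape preserved, zero count drops by one
theorem pvVisSet_facts (rowsN colsN : Nat) (v : List (List Int)) (nx ny : Int)
    (hs : pvShape rowsN colsN v)
    (hx0 : 0 ≤ nx) (hx : nx < (rowsN : Int)) (hy0 : 0 ≤ ny) (hy : ny < (colsN : Int))
    (h0 : pvVisGet v nx ny = 0) :
    pvShape rowsN colsN (pvVisSet v nx ny) ∧ pvZ (pvVisSet v nx ny) + 1 = pvZ v := by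
  obtain ⟨hl, hrows⟩ := hs
  have hi : nx.toNat < v.length := by rw [hl]; omega
  have hrow : v.getD nx.toNat [] = v[nx.toNat] := List.getD_eq_getElem v [] hi
  have hlen : (v.getD nx.toNat []).length = colsN := by
    rw [hrow]; exact hrows _ (List.getElem_mem hi)
  have hj : ny.toNat < (v.getD nx.toNat []).length := by rw [hlen]; omega
  have h0' : (v.getD nx.toNat []).getD ny.toNat 0 = 0 := h0
  refine ⟨pvShape_modify rowsN colsN v nx.toNat ny.toNat ⟨hl, hrows⟩, ?_⟩
  have hZ := pvZ_modify v nx.toNat (fun row => row.set ny.toNat 1) hi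
  have hR := pvRowZ_set (v.getD nx.toNat []) ny.toNat hj h0'
  dsimp only at hZ
  simp only [pvVisSet]
  omega

theorem stepA_eq_stepB (grid : List String) (rows cols x y c : Int) (d : Nat) (p : Int × Int)
    (h1 : pvDx.getD d 0 = p.1) (h2 : pvDy.getD d 0 = p.2)
    (base : List (Int × Int × Int)) (n : List (Int × Int)) (v : List (List Int)) :
    pvStepA grid rows cols x y c (base ++ pvTag (c + 1) n, v) d
      = (base ++ pvTag (c + 1) (pvStepB grid rows cols x y (n, v) p).1,
         (pvStepB grid rows cols x y (n, v) p).2) := by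
  simp only [pvStepA, pvStepB, h1, h2]
  by_cases hA1 : x + p.1 < 0 ∨ x + p.1 > rows - 1 ∨ y + p.2 < 0 ∨ y + p.2 > cols - 1 ∨
      pvCell grid (x + p.1) (y + p.2) = '#'
  · rw [if_pos hA1, if_neg]
    rintro ⟨b1, b2, b3, b4, b5, b6⟩
    rcases hA1 with h | h | h | h | h
    · omega
    · omega
    · omega
    · omega
    · exact b5 h
  · rw [if_neg hA1]
    push_neg at hA1
    obtain ⟨a1, a2, a3, a4, a5⟩ := hA1
    by_cases hA2 : pvVisGet v (x + p.1) (y + p.2) = 0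
    · rw [if_neg (by simp [hA2]), if_pos ⟨by omega, by omega, by omega, by omega, a5, hA2⟩]
      simp [pvTag, List.append_assoc]
    · rw [if_pos (by simp [hA2]), if_neg]
      rintro ⟨_, _, _, _, _, b6⟩
      exact hA2 b6

theorem fold_rel (grid : List String) (rows cols x y c : Int)
    (base : List (Int × Int × Int)) (n : List (Int × Int)) (v : List (List Int)) :
    (List.range 4).foldl (pvStepA grid rows cols x y c) (base ++ pvTag (c + 1) n, v)
      = (base ++ pvTag (c + 1) (pvNbrs.foldl (pvStepB grid rows cols x y) (n, v)).1,
         (pvNbrs.foldl (pvStepB grid rows cols x y) (n, v)).2) := by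
  rw [show List.range 4 = [0, 1, 2, 3] from rfl]
  show (List.foldl _ _ [0,1,2,3]) = _
  simp only [List.foldl_cons, List.foldl_nil, pvNbrs]
  rw [stepA_eq_stepB grid rows cols x y c 0 (-1, 0) rfl rfl base n v]
  rw [stepA_eq_stepB grid rows cols x y c 1 (0, 1) rfl rfl base _ _]
  rw [stepA_eq_stepB grid rows cols x y c 2 (1, 0) rfl rfl base _ _]
  rw [stepA_eq_stepB grid rows cols x y c 3 (0, -1) rfl rfl base _ _]

theorem stepB_counts (rowsN colsN : Nat) (grid : List String) (x y : Int) (p : Int × Int)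
    (st : List (Int × Int) × List (List Int)) (hs : pvShape rowsN colsN st.2) :
    pvShape rowsN colsN (pvStepB grid (rowsN : Int) (colsN : Int) x y st p).2 ∧
      (pvStepB grid (rowsN : Int) (colsN : Int) x y st p).1.length
        + pvZ (pvStepB grid (rowsN : Int) (colsN : Int) x y st p).2
        ≤ st.1.length + pvZ st.2 := by
  simp only [pvStepB]
  split_ifs with h
  · obtain ⟨b1, b2, b3, b4, b5, b6⟩ := h
    have := pvVisSet_facts rowsN colsN st.2 (x + p.1) (y + p.2) hs b1 b2 b3 b4 b6
    simp only [List.length_append, List.length_cons, List.length_nil]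
    exact ⟨this.1, by omega⟩
  · exact ⟨hs, le_refl _⟩

theorem foldB_counts (rowsN colsN : Nat) (grid : List String) (x y : Int)
    (ds : List (Int × Int)) (st : List (Int × Int) × List (List Int))
    (hs : pvShape rowsN colsN st.2) :
    pvShape rowsN colsN (ds.foldl (pvStepB grid (rowsN : Int) (colsN : Int) x y) st).2 ∧
      (ds.foldl (pvStepB grid (rowsN : Int) (colsN : Int) x y) st).1.length
        + pvZ (ds.foldl (pvStepB grid (rowsN : Int) (colsN : Int) x y) st).2
        ≤ st.1.length + pvZ st.2 := by
  induction ds generalizing st with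
  | nil => exact ⟨hs, le_refl _⟩
  | cons d ds ih =>
    have h1 := stepB_counts rowsN colsN grid x y d st hs
    have h2 := ih _ h1.1
    simp only [List.foldl_cons]
    exact ⟨h2.1, le_trans h2.2 h1.2⟩

theorem pvBridge (grid : List String) (maxTime : Int) :
    ∀ (fB : Nat) (front : List (Int × Int)) (fA : Nat) (next : List (Int × Int))
      (visited : List (List Int)) (c : Int),
    pvShape grid.length (grid.headD "").length visited →
    front.length + next.length + pvZ visited + 1 ≤ fA →
    next.length + pvZ visited + 1 ≤ fB →
    pvLoopA grid (grid.length : Int) ((grid.headD "").length : Int) maxTime fA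
        (pvTag c front ++ pvTag (c + 1) next) visited
      = pvContB grid (grid.length : Int) ((grid.headD "").length : Int) maxTime fB c
          front next visited := by
  intro fB
  induction fB with
  | zero => intro front fA next visited c _ _ hB; omega
  | succ g ihB =>
    intro front
    induction front with
    | nil =>
      intro fA next visited c hs hA hB
      cases next with
      | nil =>
        cases fA <;>
          simp [pvTag, pvLoopA, pvContB, pvInnerB, pvOuterB]
      | cons p rest =>
        have step : pvContB grid (grid.length : Int) ((grid.headD "").length : Int) maxTime
            (g + 1) c [] (p :: rest) visited
            = pvContB grid (grid.length : Int) ((grid.headD "").length : Int) maxTime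
                g (c + 1) (p :: rest) [] visited := by
          simp [pvContB, pvInnerB, pvOuterB]
        rw [step]
        have := ihB (p :: rest) fA [] visited (c + 1) hs (by simp at hA ⊢; omega)
          (by simp at hB ⊢; omega)
        simpa [pvTag] using this
    | cons hd rest ih =>
      intro fA next visited c hs hA hB
      obtain ⟨x, y⟩ := hd
      obtain ⟨f, rfl⟩ : ∃ f, fA = f + 1 := by
        cases fA with
        | zero => simp at hA
        | succ f => exact ⟨f, rfl⟩
      by_cases hend : x = (grid.length : Int) - 1 ∧ y = ((grid.headD "").length : Int) - 1
      · have lhs1 : pvTag c ((x, y) :: rest) ++ pvTag (c + 1) next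
            = (x, y, c) :: (pvTag c rest ++ pvTag (c + 1) next) := by simp [pvTag]
        rw [lhs1]
        simp only [pvLoopA, pvContB, pvInnerB, if_pos hend]
      · have lhs1 : pvTag c ((x, y) :: rest) ++ pvTag (c + 1) next
            = (x, y, c) :: (pvTag c rest ++ pvTag (c + 1) next) := by simp [pvTag]
        rw [lhs1]
        simp only [pvLoopA, if_neg hend]
        rw [fold_rel grid (grid.length : Int) ((grid.headD "").length : Int) x y c
              (pvTag c rest) next visited]
        have hcnt := foldB_counts grid.length (grid.headD "").length grid x y pvNbrs
          (next, visited) hs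
        have rhs1 : pvContB grid (grid.length : Int) ((grid.headD "").length : Int) maxTime
            (g + 1) c ((x, y) :: rest) next visited
            = pvContB grid (grid.length : Int) ((grid.headD "").length : Int) maxTime
                (g + 1) c rest
                (pvNbrs.foldl (pvStepB grid (grid.length : Int) ((grid.headD "").length : Int) x y) (next, visited)).1
                (pvNbrs.foldl (pvStepB grid (grid.length : Int) ((grid.headD "").length : Int) x y) (next, visited)).2 := by
          simp only [pvContB, pvInnerB, if_neg hend]
        rw [rhs1]
        apply ih f _ _ c hcnt.1
        · have := hcnt.2
          dsimp only at this
          simp only [List.length_cons] at hA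
          omega
        · have := hcnt.2
          dsimp only at this
          omega

-- the initial all-zero visited matrix: its shape and zero count
theorem pvRowZ_rep (n : Nat) : pvRowZ (List.replicate n (0 : Int)) = n := by
  induction n with
  | zero => simp [pvRowZ]
  | succ n ih => simp [pvRowZ, List.replicate_succ, List.countP_cons] at ih ⊢; omega

theorem pvZ_rep (m n : Nat) : pvZ (List.replicate m (List.replicate n (0 : Int))) = m * n := by
  induction m with
  | zero => simp [pvZ]
  | succ m ih =>
    simp only [pvZ, List.replicate_succ, List.map_cons, List.sum_cons] at ih ⊢
    rw [pvRowZ_rep, ih, Nat.succ_mul]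
    omega

theorem pvShape_rep (m n : Nat) :
    pvShape m n (List.replicate m (List.replicate n (0 : Int))) := by
  refine ⟨by simp, ?_⟩
  intro r hr
  rw [List.eq_of_mem_replicate hr]
  simp

-- ---------- coordinates, adjacency, matrix access on Int pairs ----------
def pvRI (R : List (List Bool)) (p : Int × Int) : Bool := pvRAt R p.1.toNat p.2.toNat
def pvVIv (v : List (List Int)) (p : Int × Int) : Int := pvVisGet v p.1 p.2
def pvInbP (rows cols : Nat) (p : Int × Int) : Prop :=
  0 ≤ p.1 ∧ p.1 < (rows : Int) ∧ 0 ≤ p.2 ∧ p.2 < (cols : Int)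
def pvNWP (grid : List String) (p : Int × Int) : Prop := ¬ pvCell grid p.1 p.2 = '#'
def pvNbrsOf (p : Int × Int) : List (Int × Int) := pvNbrs.map (fun d => (p.1 + d.1, p.2 + d.2))
def pvBin (v : List (List Int)) : Prop := ∀ p : Int × Int, pvVIv v p = 0 ∨ pvVIv v p = 1

-- cells newly marked by scanning frontier l over visited matrix v
def pvAddL (grid : List String) (rows cols : Nat) (v : List (List Int))
    (l : List (Int × Int)) (q : Int × Int) : Prop :=
  pvInbP rows cols q ∧ pvNWP grid q ∧ pvVIv v q = 0 ∧ ∃ p ∈ l, q ∈ pvNbrsOf p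

theorem pvNbrsOf_mem (p q : Int × Int) :
    q ∈ pvNbrsOf p ↔ ((q.1 = p.1 - 1 ∧ q.2 = p.2) ∨ (q.1 = p.1 ∧ q.2 = p.2 + 1) ∨
      (q.1 = p.1 + 1 ∧ q.2 = p.2) ∨ (q.1 = p.1 ∧ q.2 = p.2 - 1)) := by
  obtain ⟨qx, qy⟩ := q
  simp [pvNbrsOf, pvNbrs, Prod.ext_iff]
  omega

theorem pvNbrsOf_symm (p q : Int × Int) : q ∈ pvNbrsOf p ↔ p ∈ pvNbrsOf q := by
  rw [pvNbrsOf_mem, pvNbrsOf_mem]; omega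

theorem pvNbrsOf_ne (p q : Int × Int) (h : q ∈ pvNbrsOf p) : q ≠ p := by
  rw [pvNbrsOf_mem] at h
  intro he; subst he; omega

-- value of one visited mark, at in-bounds coordinates
theorem pvVIv_set (rows cols : Nat) (v : List (List Int)) (a q : Int × Int)
    (hs : pvShape rows cols v) (ha : pvInbP rows cols a) (hq : pvInbP rows cols q) :
    pvVIv (pvVisSet v a.1 a.2) q = if q = a then 1 else pvVIv v q := by
  obtain ⟨ha1, ha2, ha3, ha4⟩ := ha
  obtain ⟨hq1, hq2, hq3, hq4⟩ := hq
  obtain ⟨hl, hrows⟩ := hs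
  have hia : a.1.toNat < v.length := by omega
  have hiq : q.1.toNat < v.length := by omega
  have hrowq : (v.getD q.1.toNat []).length = cols := by
    rw [List.getD_eq_getElem v [] hiq]; exact hrows _ (List.getElem_mem hiq)
  have hja : a.2.toNat < cols := by omega
  have hjq : q.2.toNat < cols := by omega
  have hmod : (pvVisSet v a.1 a.2).getD q.1.toNat []
      = if a.1.toNat = q.1.toNat then (v.getD q.1.toNat []).set a.2.toNat 1
        else v.getD q.1.toNat [] := by
    unfold pvVisSet
    rw [List.getD_eq_getElem _ [] (by simpa using hiq), List.getD_eq_getElem v [] hiq]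
    rw [List.getElem_modify]
  show (((pvVisSet v a.1 a.2).getD q.1.toNat []).getD q.2.toNat 0) = _
  rw [hmod]
  by_cases hrow : a.1.toNat = q.1.toNat
  · rw [if_pos hrow]
    have hjq' : q.2.toNat < ((v.getD q.1.toNat []).set a.2.toNat 1).length := by
      rw [List.length_set, hrowq]; exact hjq
    rw [List.getD_eq_getElem _ 0 hjq', List.getElem_set]
    by_cases hcol : a.2.toNat = q.2.toNat
    · rw [if_pos hcol, if_pos (Prod.ext_iff.mpr ⟨by omega, by omega⟩)]
    · rw [if_neg hcol, if_neg (by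
        intro he; subst he; exact hcol rfl)]
      show _ = (v.getD q.1.toNat []).getD q.2.toNat 0
      rw [List.getD_eq_getElem _ 0 (by rw [hrowq]; exact hjq)]
  · rw [if_neg hrow, if_neg (by
      intro he; subst he; exact hrow rfl)]
    rfl

-- reading the Jacobi step matrix
theorem pvStepJ_shape (grid : List String) (rows cols : Nat) (R : List (List Bool)) :
    (pvStepJ grid rows cols R).length = rows ∧
      ∀ r ∈ pvStepJ grid rows cols R, r.length = cols := by
  constructor
  · simp [pvStepJ]
  · intro r hr
    simp only [pvStepJ, List.mem_map] at hr
    obtain ⟨i, _, rfl⟩ := hr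
    simp

theorem pvRAt_mk (f : Nat → Nat → Bool) (rows cols i j : Nat) (hi : i < rows) (hj : j < cols) :
    pvRAt ((List.range rows).map (fun i => (List.range cols).map (fun j => f i j))) i j = f i j := by
  show ((((List.range rows).map (fun i => (List.range cols).map (fun j => f i j))).getD i []).getD j false) = f i j
  rw [List.getD_eq_getElem _ [] (by simpa using hi)]
  simp only [List.getElem_map, List.getElem_range]
  rw [List.getD_eq_getElem _ false (by simpa using hj)]
  simp

theorem pvRAt_stepJ (grid : List String) (rows cols : Nat) (R : List (List Bool))
    (i j : Nat) (hi : i < rows) (hj : j < cols) :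
    pvRAt (pvStepJ grid rows cols R) i j =
      (pvRAt R i j ||
        (decide (¬ pvCell grid (i : Int) (j : Int) = '#') &&
          ((decide (0 < i) && pvRAt R (i - 1) j) ||
           (decide (j + 1 < cols) && pvRAt R i (j + 1)) ||
           (decide (i + 1 < rows) && pvRAt R (i + 1) j) ||
           (decide (0 < j) && pvRAt R i (j - 1))))) := by
  exact pvRAt_mk _ rows cols i j hi hj

theorem pvRI_stepJ_iff (grid : List String) (rows cols : Nat) (R : List (List Bool))
    (q : Int × Int) (hq : pvInbP rows cols q) :
    pvRI (pvStepJ grid rows cols R) q = true ↔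
      (pvRI R q = true ∨ (pvNWP grid q ∧
        ∃ p ∈ pvNbrsOf q, pvInbP rows cols p ∧ pvRI R p = true)) := by
  obtain ⟨qx, qy⟩ := q
  obtain ⟨h1, h2, h3, h4⟩ := hq
  dsimp only at h1 h2 h3 h4 ⊢
  have hi : qx.toNat < rows := by omega
  have hj : qy.toNat < cols := by omega
  have hxx : (qx.toNat : Int) = qx := Int.toNat_of_nonneg h1
  have hyy : (qy.toNat : Int) = qy := Int.toNat_of_nonneg h3
  have key := pvRAt_stepJ grid rows cols R qx.toNat qy.toNat hi hj
  rw [hxx, hyy] at key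
  have tm1 : (qx - 1).toNat = qx.toNat - 1 := by omega
  have tp1 : (qx + 1).toNat = qx.toNat + 1 := by omega
  have tm2 : (qy - 1).toNat = qy.toNat - 1 := by omega
  have tp2 : (qy + 1).toNat = qy.toNat + 1 := by omega
  show pvRAt (pvStepJ grid rows cols R) qx.toNat qy.toNat = true ↔ _
  rw [key]
  simp only [Bool.or_eq_true, Bool.and_eq_true, decide_eq_true_eq]
  constructor
  · rintro (h | ⟨hnw, h⟩)
    · exact Or.inl h
    · refine Or.inr ⟨hnw, ?_⟩
      rcases h with ((⟨h0, hA⟩ | ⟨h0, hA⟩) | ⟨h0, hA⟩) | ⟨h0, hA⟩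
      · exact ⟨(qx - 1, qy), by rw [pvNbrsOf_mem]; exact Or.inl ⟨rfl, rfl⟩,
          ⟨by omega, by omega, h3, h4⟩,
          by show pvRAt R (qx - 1).toNat qy.toNat = true; rw [tm1]; exact hA⟩
      · exact ⟨(qx, qy + 1), by rw [pvNbrsOf_mem]; exact Or.inr (Or.inl ⟨rfl, rfl⟩),
          ⟨h1, h2, by omega, by omega⟩,
          by show pvRAt R qx.toNat (qy + 1).toNat = true; rw [tp2]; exact hA⟩
      · exact ⟨(qx + 1, qy), by rw [pvNbrsOf_mem]; exact Or.inr (Or.inr (Or.inl ⟨rfl, rfl⟩)),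
          ⟨by omega, by omega, h3, h4⟩,
          by show pvRAt R (qx + 1).toNat qy.toNat = true; rw [tp1]; exact hA⟩
      · exact ⟨(qx, qy - 1), by rw [pvNbrsOf_mem]; exact Or.inr (Or.inr (Or.inr ⟨rfl, rfl⟩)),
          ⟨h1, h2, by omega, by omega⟩,
          by show pvRAt R qx.toNat (qy - 1).toNat = true; rw [tm2]; exact hA⟩
  · rintro (h | ⟨hnw, p, hp, hinb, hR⟩)
    · exact Or.inl h
    · refine Or.inr ⟨hnw, ?_⟩
      rw [pvNbrsOf_mem] at hp
      obtain ⟨hp1, hp2, hp3, hp4⟩ := hinb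
      obtain ⟨px, py⟩ := p
      dsimp only at hp hp1 hp2 hp3 hp4 hR
      rcases hp with ⟨e1, e2⟩ | ⟨e1, e2⟩ | ⟨e1, e2⟩ | ⟨e1, e2⟩
      · rw [e1, e2] at hR
        have hR' : pvRAt R (qx - 1).toNat qy.toNat = true := hR
        rw [tm1] at hR'
        rw [e1] at hp1
        exact Or.inl (Or.inl (Or.inl ⟨by omega, hR'⟩))
      · rw [e1, e2] at hR
        have hR' : pvRAt R qx.toNat (qy + 1).toNat = true := hR
        rw [tp2] at hR'
        rw [e2] at hp4
        exact Or.inl (Or.inl (Or.inr ⟨by omega, hR'⟩))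
      · rw [e1, e2] at hR
        have hR' : pvRAt R (qx + 1).toNat qy.toNat = true := hR
        rw [tp1] at hR'
        rw [e1] at hp2
        exact Or.inl (Or.inr ⟨by omega, hR'⟩)
      · rw [e1, e2] at hR
        have hR' : pvRAt R qx.toNat (qy - 1).toNat = true := hR
        rw [tm2] at hR'
        rw [e2] at hp3
        exact Or.inr ⟨by omega, hR'⟩

-- extensionality for boolean matrices of the same rows×cols shape
theorem pvExtB (rows cols : Nat) (R S : List (List Bool))
    (h1 : R.length = rows) (h2 : ∀ r ∈ R, r.length = cols)
    (h3 : S.length = rows) (h4 : ∀ r ∈ S, r.length = cols)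
    (h : ∀ i j, i < rows → j < cols → pvRAt R i j = pvRAt S i j) : R = S := by
  apply List.ext_getElem (by omega)
  intro i hiR hiS
  apply List.ext_getElem
  · rw [h2 _ (List.getElem_mem hiR), h4 _ (List.getElem_mem hiS)]
  · intro j hjR hjS
    have hi : i < rows := by omega
    have hj : j < cols := by rw [h2 _ (List.getElem_mem hiR)] at hjR; exact hjR
    have := h i j hi hj
    unfold pvRAt at this
    rwa [List.getD_eq_getElem R [] hiR, List.getD_eq_getElem S [] hiS,
      List.getD_eq_getElem _ false hjR, List.getD_eq_getElem _ false hjS] at this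

theorem pvAddL_cons (grid : List String) (rows cols : Nat) (v : List (List Int))
    (p0 : Int × Int) (rest : List (Int × Int)) (q : Int × Int) :
    pvAddL grid rows cols v (p0 :: rest) q ↔
      ((pvInbP rows cols q ∧ pvNWP grid q ∧ pvVIv v q = 0 ∧ q ∈ pvNbrsOf p0) ∨
        pvAddL grid rows cols v rest q) := by
  unfold pvAddL
  constructor
  · rintro ⟨hi, hn, hz, p, hp, hm⟩
    rcases List.mem_cons.mp hp with rfl | hp'
    · exact Or.inl ⟨hi, hn, hz, hm⟩
    · exact Or.inr ⟨hi, hn, hz, p, hp', hm⟩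
  · rintro (⟨hi, hn, hz, hm⟩ | ⟨hi, hn, hz, p, hp', hm⟩)
    · exact ⟨hi, hn, hz, p0, List.mem_cons_self, hm⟩
    · exact ⟨hi, hn, hz, p, List.mem_cons_of_mem _ hp', hm⟩

-- characterization of the 4-neighbour fold of pvStepB
theorem pvFold_char (grid : List String) (rows cols : Nat) (x y : Int)
    (ds : List (Int × Int)) (n0 : List (Int × Int)) (v0 : List (List Int))
    (hs : pvShape rows cols v0) :
    pvShape rows cols (ds.foldl (pvStepB grid (rows : Int) (cols : Int) x y) (n0, v0)).2 ∧
    (∀ q, pvInbP rows cols q →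
      ((pvNWP grid q ∧ pvVIv v0 q = 0 ∧ q ∈ ds.map (fun d => (x + d.1, y + d.2)) →
        pvVIv (ds.foldl (pvStepB grid (rows : Int) (cols : Int) x y) (n0, v0)).2 q = 1) ∧
       (¬(pvNWP grid q ∧ pvVIv v0 q = 0 ∧ q ∈ ds.map (fun d => (x + d.1, y + d.2))) →
        pvVIv (ds.foldl (pvStepB grid (rows : Int) (cols : Int) x y) (n0, v0)).2 q = pvVIv v0 q))) ∧
    (∀ q, q ∈ (ds.foldl (pvStepB grid (rows : Int) (cols : Int) x y) (n0, v0)).1 ↔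
        q ∈ n0 ∨ (pvInbP rows cols q ∧ pvNWP grid q ∧ pvVIv v0 q = 0 ∧
          q ∈ ds.map (fun d => (x + d.1, y + d.2)))) := by
  induction ds generalizing n0 v0 with
  | nil =>
    refine ⟨hs, ?_, ?_⟩
    · intro q _
      exact ⟨by rintro ⟨_, _, hm⟩; simp at hm, fun _ => rfl⟩
    · intro q; simp
  | cons d rest ih =>
    simp only [List.foldl_cons, List.map_cons]
    by_cases hg : pvInbP rows cols (x + d.1, y + d.2) ∧ pvNWP grid (x + d.1, y + d.2) ∧
        pvVIv v0 (x + d.1, y + d.2) = 0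
    · have hst : pvStepB grid (rows : Int) (cols : Int) x y (n0, v0) d
          = (n0 ++ [(x + d.1, y + d.2)], pvVisSet v0 (x + d.1) (y + d.2)) := by
        obtain ⟨⟨a, b, c', d'⟩, e, f⟩ := hg
        simp only [pvStepB]
        rw [if_pos ⟨a, b, c', d', e, f⟩]
      rw [hst]
      have hsv1 : pvShape rows cols (pvVisSet v0 (x + d.1) (y + d.2)) := by
        obtain ⟨⟨a, b, c', d'⟩, e, f⟩ := hg
        exact (pvVisSet_facts rows cols v0 _ _ hs a b c' d' f).1
      obtain ⟨S, V, M⟩ := ih (n0 ++ [(x + d.1, y + d.2)]) _ hsv1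
      have hset : ∀ q, pvInbP rows cols q →
          pvVIv (pvVisSet v0 (x + d.1) (y + d.2)) q
            = if q = (x + d.1, y + d.2) then 1 else pvVIv v0 q := by
        intro q hq
        exact pvVIv_set rows cols v0 (x + d.1, y + d.2) q hs hg.1 hq
      refine ⟨S, ?_, ?_⟩
      · intro q hq
        obtain ⟨Vp, Vn⟩ := V q hq
        by_cases hqo : q = (x + d.1, y + d.2)
        · subst hqo
          constructor
          · intro _
            rw [Vn (by
              rintro ⟨_, hz, _⟩
              rw [hset _ hq, if_pos rfl] at hz
              exact absurd hz (by norm_num)), hset _ hq, if_pos rfl]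
          · intro hn
            exact absurd ⟨hg.2.1, hg.2.2, List.mem_cons_self⟩ hn
        · have hv1 : pvVIv (pvVisSet v0 (x + d.1) (y + d.2)) q = pvVIv v0 q := by
            rw [hset _ hq, if_neg hqo]
          constructor
          · rintro ⟨hnw, hz, hm⟩
            rcases List.mem_cons.mp hm with he | hm'
            · exact absurd he hqo
            · exact Vp ⟨hnw, by rw [hv1]; exact hz, hm'⟩
          · intro hn
            rw [Vn (by
              rintro ⟨hnw, hz, hm'⟩
              rw [hv1] at hz
              exact hn ⟨hnw, hz, List.mem_cons_of_mem _ hm'⟩), hv1]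
      · intro q
        rw [M q]
        by_cases hqo : q = (x + d.1, y + d.2)
        · subst hqo
          constructor
          · intro _
            exact Or.inr ⟨hg.1, hg.2.1, hg.2.2, List.mem_cons_self⟩
          · intro _
            exact Or.inl (List.mem_append_right _ (List.mem_singleton.mpr rfl))
        · constructor
          · rintro (hm | ⟨hi2, hnw, hz, hm'⟩)
            · rcases List.mem_append.mp hm with hmn | hme
              · exact Or.inl hmn
              · exact absurd (List.mem_singleton.mp hme) hqo
            · have hv1 : pvVIv (pvVisSet v0 (x + d.1) (y + d.2)) q = pvVIv v0 q := by
                rw [hset _ hi2, if_neg hqo]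
              rw [hv1] at hz
              exact Or.inr ⟨hi2, hnw, hz, List.mem_cons_of_mem _ hm'⟩
          · rintro (hm | ⟨hi2, hnw, hz, hm2⟩)
            · exact Or.inl (List.mem_append_left _ hm)
            · rcases List.mem_cons.mp hm2 with he | hm'
              · exact absurd he hqo
              · have hv1 : pvVIv (pvVisSet v0 (x + d.1) (y + d.2)) q = pvVIv v0 q := by
                  rw [hset _ hi2, if_neg hqo]
                exact Or.inr ⟨hi2, hnw, by rw [hv1]; exact hz, hm'⟩
    · have hst : pvStepB grid (rows : Int) (cols : Int) x y (n0, v0) d = (n0, v0) := by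
        simp only [pvStepB]
        rw [if_neg]
        rintro ⟨a, b, c', d', e, f⟩
        exact hg ⟨⟨a, b, c', d'⟩, e, f⟩
      rw [hst]
      obtain ⟨S, V, M⟩ := ih n0 v0 hs
      refine ⟨S, ?_, ?_⟩
      · intro q hq
        obtain ⟨Vp, Vn⟩ := V q hq
        constructor
        · rintro ⟨hnw, hz, hm⟩
          rcases List.mem_cons.mp hm with he | hm'
          · subst he
            exact absurd ⟨hq, hnw, hz⟩ hg
          · exact Vp ⟨hnw, hz, hm'⟩
        · intro hn
          exact Vn (by
            rintro ⟨hnw, hz, hm'⟩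
            exact hn ⟨hnw, hz, List.mem_cons_of_mem _ hm'⟩)
      · intro q
        rw [M q]
        constructor
        · rintro (hm | ⟨hi2, hnw, hz, hm'⟩)
          · exact Or.inl hm
          · exact Or.inr ⟨hi2, hnw, hz, List.mem_cons_of_mem _ hm'⟩
        · rintro (hm | ⟨hi2, hnw, hz, hm2⟩)
          · exact Or.inl hm
          · rcases List.mem_cons.mp hm2 with he | hm'
            · subst he
              exact absurd ⟨hi2, hnw, hz⟩ hg
            · exact Or.inr ⟨hi2, hnw, hz, hm'⟩

-- characterization of one full level scan (no end cell in the frontier)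
theorem pvInner_char (grid : List String) (rows cols : Nat) (maxTime c : Int)
    (l n0 : List (Int × Int)) (v0 : List (List Int))
    (hs : pvShape rows cols v0)
    (hend : ∀ p ∈ l, ¬(p.1 = (rows : Int) - 1 ∧ p.2 = (cols : Int) - 1)) :
    ∃ nf vf, pvInnerB grid (rows : Int) (cols : Int) maxTime c l n0 v0 = .inr (nf, vf) ∧
      pvShape rows cols vf ∧
      (∀ q, pvInbP rows cols q →
        (pvAddL grid rows cols v0 l q → pvVIv vf q = 1) ∧
        (¬ pvAddL grid rows cols v0 l q → pvVIv vf q = pvVIv v0 q)) ∧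
      (∀ q, q ∈ nf ↔ q ∈ n0 ∨ pvAddL grid rows cols v0 l q) ∧
      nf.length + pvZ vf ≤ n0.length + pvZ v0 := by
  induction l generalizing n0 v0 with
  | nil =>
    refine ⟨n0, v0, rfl, hs, ?_, ?_, le_refl _⟩
    · intro q _
      refine ⟨?_, fun _ => rfl⟩
      rintro ⟨_, _, _, p, hp, _⟩
      simp at hp
    · intro q
      constructor
      · exact Or.inl
      · rintro (h | ⟨_, _, _, p, hp, _⟩)
        · exact h
        · simp at hp
  | cons p0 rest ih =>
    obtain ⟨x, y⟩ := p0
    have hne := hend (x, y) List.mem_cons_self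
    have hrest : ∀ p ∈ rest, ¬(p.1 = (rows : Int) - 1 ∧ p.2 = (cols : Int) - 1) :=
      fun p hp => hend p (List.mem_cons_of_mem _ hp)
    obtain ⟨FS, FV, FM⟩ := pvFold_char grid rows cols x y pvNbrs n0 v0 hs
    obtain ⟨nf, vf, heq, hshape, hval, hmem, hcnt⟩ := ih
      (pvNbrs.foldl (pvStepB grid (rows : Int) (cols : Int) x y) (n0, v0)).1
      (pvNbrs.foldl (pvStepB grid (rows : Int) (cols : Int) x y) (n0, v0)).2 FS hrest
    have hFcnt := foldB_counts rows cols grid x y pvNbrs (n0, v0) hs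
    refine ⟨nf, vf, ?_, hshape, ?_, ?_, ?_⟩
    · show (if x = (rows : Int) - 1 ∧ y = (cols : Int) - 1 then _ else _) = _
      rw [if_neg hne]
      exact heq
    · intro q hq
      obtain ⟨Hp, Hn⟩ := hval q hq
      obtain ⟨Gp, Gn⟩ := FV q hq
      by_cases hA : pvNWP grid q ∧ pvVIv v0 q = 0 ∧
          q ∈ pvNbrs.map (fun d => (x + d.1, y + d.2))
      · have h1 := Gp hA
        constructor
        · intro _
          rw [Hn (by
            rintro ⟨_, _, hz, _⟩
            rw [h1] at hz
            exact absurd hz (by norm_num)), h1]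
        · intro hn
          exact absurd ⟨hq, hA.1, hA.2.1, (x, y), List.mem_cons_self, hA.2.2⟩ hn
      · have h0 := Gn hA
        constructor
        · intro hAdd
          rw [pvAddL_cons] at hAdd
          rcases hAdd with ⟨_, hn2, hz, hm⟩ | ⟨hi2, hn2, hz, w⟩
          · exact absurd ⟨hn2, hz, hm⟩ hA
          · exact Hp ⟨hi2, hn2, by rw [h0]; exact hz, w⟩
        · intro hn
          rw [Hn (by
            rintro ⟨hi2, hnw, hz, w⟩
            rw [h0] at hz
            exact hn ((pvAddL_cons grid rows cols v0 (x, y) rest q).mpr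
              (Or.inr ⟨hi2, hnw, hz, w⟩))), h0]
    · intro q
      rw [hmem q]
      constructor
      · rintro (hst | hAdd)
        · rcases (FM q).mp hst with hn0 | ⟨hi2, hnw, hz, hm⟩
          · exact Or.inl hn0
          · exact Or.inr ⟨hi2, hnw, hz, (x, y), List.mem_cons_self, hm⟩
        · obtain ⟨hi2, hnw, hz, w⟩ := hAdd
          by_cases hH : pvNWP grid q ∧ pvVIv v0 q = 0 ∧
              q ∈ pvNbrs.map (fun d => (x + d.1, y + d.2))
          · have := (FV q hi2).1 hH
            rw [this] at hz
            exact absurd hz (by norm_num)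
          · have h0 := (FV q hi2).2 hH
            refine Or.inr ((pvAddL_cons grid rows cols v0 (x, y) rest q).mpr
              (Or.inr ⟨hi2, hnw, by rw [← h0]; exact hz, w⟩))
      · rintro (hn0 | hAdd)
        · exact Or.inl ((FM q).mpr (Or.inl hn0))
        · rw [pvAddL_cons] at hAdd
          rcases hAdd with ⟨hi2, hnw, hz, hm⟩ | ⟨hi2, hnw, hz, w⟩
          · exact Or.inl ((FM q).mpr (Or.inr ⟨hi2, hnw, hz, hm⟩))
          · by_cases hH : pvNWP grid q ∧ pvVIv v0 q = 0 ∧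
                q ∈ pvNbrs.map (fun d => (x + d.1, y + d.2))
            · exact Or.inl ((FM q).mpr (Or.inr ⟨hi2, hH.1, hH.2.1, hH.2.2⟩))
            · have h0 := (FV q hi2).2 hH
              exact Or.inr ⟨hi2, hnw, by rw [h0]; exact hz, w⟩
    · exact le_trans hcnt hFcnt.2

-- a frontier containing the end cell returns immediately with the level verdict
theorem pvInner_end (grid : List String) (rows cols maxTime c : Int)
    (l n0 : List (Int × Int)) (v0 : List (List Int))
    (hend : ∃ p ∈ l, p.1 = rows - 1 ∧ p.2 = cols - 1) :
    pvInnerB grid rows cols maxTime c l n0 v0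
      = .inl (if c ≤ maxTime then "Yes" else "No") := by
  induction l generalizing n0 v0 with
  | nil => simp at hend
  | cons p0 rest ih =>
    obtain ⟨x, y⟩ := p0
    obtain ⟨p, hp, hcond⟩ := hend
    by_cases hx : x = rows - 1 ∧ y = cols - 1
    · simp only [pvInnerB, if_pos hx]
    · rcases List.mem_cons.mp hp with rfl | hp'
      · exact absurd hcond hx
      · simp only [pvInnerB, if_neg hx]
        exact ih _ _ ⟨p, hp', hcond⟩

theorem pvStepB_noadd (grid : List String) (rows cols x y : Int)
    (st : List (Int × Int) × List (List Int)) (d : Int × Int)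
    (h : ¬(0 ≤ x + d.1 ∧ x + d.1 < rows ∧ 0 ≤ y + d.2 ∧ y + d.2 < cols ∧
        ¬ pvCell grid (x + d.1) (y + d.2) = '#' ∧ pvVisGet st.2 (x + d.1) (y + d.2) = 0)) :
    pvStepB grid rows cols x y st d = st := by
  simp only [pvStepB]
  rw [if_neg h]

theorem pvFold_noadd (grid : List String) (rows cols : Nat)
    (n : List (Int × Int)) (v : List (List Int))
    (h : ∀ p ∈ pvNbrsOf ((0 : Int), (0 : Int)),
      ¬(pvInbP rows cols p ∧ pvNWP grid p ∧ pvVIv v p = 0)) :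
    pvNbrs.foldl (pvStepB grid (rows : Int) (cols : Int) 0 0) (n, v) = (n, v) := by
  have h' : ∀ d ∈ pvNbrs, pvStepB grid (rows : Int) (cols : Int) 0 0 (n, v) d = (n, v) := by
    intro d hd
    apply pvStepB_noadd
    rintro ⟨a, b, c', d', e, f⟩
    exact h ((0 : Int) + d.1, (0 : Int) + d.2) (List.mem_map_of_mem hd) ⟨⟨a, b, c', d'⟩, e, f⟩
  show List.foldl _ _ pvNbrs = _
  rw [show pvNbrs = [((-1 : Int), (0 : Int)), (0, 1), (1, 0), (0, -1)] from rfl]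
  simp only [List.foldl_cons, List.foldl_nil]
  rw [h' (-1, 0) (by simp [pvNbrs]), h' (0, 1) (by simp [pvNbrs]),
    h' (1, 0) (by simp [pvNbrs]), h' (0, -1) (by simp [pvNbrs])]

theorem pvInner_onlyStart (grid : List String) (rows cols : Nat) (maxTime c : Int)
    (l : List (Int × Int)) (n : List (Int × Int)) (v : List (List Int))
    (hall : ∀ q ∈ l, q = ((0 : Int), (0 : Int)))
    (hnb : ∀ p ∈ pvNbrsOf ((0 : Int), (0 : Int)),
      ¬(pvInbP rows cols p ∧ pvNWP grid p ∧ pvVIv v p = 0))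
    (hne : ¬((0 : Int) = (rows : Int) - 1 ∧ (0 : Int) = (cols : Int) - 1)) :
    pvInnerB grid (rows : Int) (cols : Int) maxTime c l n v = .inr (n, v) := by
  induction l with
  | nil => rfl
  | cons p0 rest ih =>
    have hp0 := hall p0 List.mem_cons_self
    obtain ⟨x, y⟩ := p0
    injection hp0 with hx hy
    subst hx; subst hy
    show (if (0 : Int) = (rows : Int) - 1 ∧ (0 : Int) = (cols : Int) - 1 then _ else _) = _
    rw [if_neg hne]
    have hfold := pvFold_noadd grid rows cols n v hnb
    dsimp only
    rw [hfold]
    exact ih (fun q hq => hall q (List.mem_cons_of_mem _ hq))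

-- a frontier made only of the (re-queued) start cell, all of whose neighbours are already
-- visited, dies out in two more levels
theorem pvOnlyStart (grid : List String) (rows cols : Nat) (maxTime c : Int)
    (nf : List (Int × Int)) (vf : List (List Int)) (f : Nat)
    (hall : ∀ q ∈ nf, q = ((0 : Int), (0 : Int)))
    (hnb : ∀ p ∈ pvNbrsOf ((0 : Int), (0 : Int)),
      ¬(pvInbP rows cols p ∧ pvNWP grid p ∧ pvVIv vf p = 0))
    (hne : ¬((0 : Int) = (rows : Int) - 1 ∧ (0 : Int) = (cols : Int) - 1))
    (hf : 2 ≤ f) :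
    pvOuterB grid (rows : Int) (cols : Int) maxTime f nf c vf = "No" := by
  obtain ⟨f1, rfl⟩ : ∃ f1, f = f1 + 2 := ⟨f - 2, by omega⟩
  cases nf with
  | nil => simp [pvOuterB]
  | cons q0 qs =>
    show pvOuterB grid (rows : Int) (cols : Int) maxTime (f1 + 1 + 1) (q0 :: qs) c vf = "No"
    simp only [pvOuterB]
    rw [if_neg (by simp)]
    rw [pvInner_onlyStart grid rows cols maxTime c (q0 :: qs) [] vf hall hnb hne]
    simp [pvOuterB]

-- one zero entry makes pvZ positive
theorem pvZ_pos (rows cols : Nat) (v : List (List Int)) (q : Int × Int)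
    (hs : pvShape rows cols v) (hq : pvInbP rows cols q) (h0 : pvVIv v q = 0) :
    1 ≤ pvZ v := by
  obtain ⟨hl, hrows⟩ := hs
  obtain ⟨h1, h2, h3, h4⟩ := hq
  have hi : q.1.toNat < v.length := by omega
  have row := v.getD q.1.toNat []
  have hrowlen : (v.getD q.1.toNat []).length = cols := by
    rw [List.getD_eq_getElem v [] hi]; exact hrows _ (List.getElem_mem hi)
  have hj : q.2.toNat < (v.getD q.1.toNat []).length := by omega
  have hmemrow : (v.getD q.1.toNat []) ∈ v := by
    rw [List.getD_eq_getElem v [] hi]; exact List.getElem_mem hi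
  have hrz : 1 ≤ pvRowZ (v.getD q.1.toNat []) := by
    have hv0 : (v.getD q.1.toNat []).getD q.2.toNat 0 = 0 := h0
    rw [List.getD_eq_getElem _ 0 hj] at hv0
    have hmem0 : (0 : Int) ∈ v.getD q.1.toNat [] := by
      rw [← hv0]; exact List.getElem_mem hj
    have h01 : 0 < (v.getD q.1.toNat []).countP (fun a => a = 0) :=
      List.countP_pos_iff.mpr ⟨0, hmem0, by simp⟩
    unfold pvRowZ
    omega
  have : pvRowZ (v.getD q.1.toNat []) ≤ pvZ v := by
    unfold pvZ
    exact List.le_sum_of_mem (List.mem_map_of_mem hmemrow)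
  omega

theorem pvRI_natCast (X : List (List Bool)) (i j : Nat) :
    pvRI X ((i : Int), (j : Int)) = pvRAt X i j := by
  show pvRAt X ((i : Int)).toNat ((j : Int)).toNat = _
  simp

theorem pvVIv_default (rows cols : Nat) (v : List (List Int)) (hs : pvShape rows cols v)
    (p : Int × Int) (h : ¬(p.1.toNat < rows ∧ p.2.toNat < cols)) : pvVIv v p = 0 := by
  obtain ⟨hl, hrows⟩ := hs
  by_cases hi : p.1.toNat < v.length
  · have hrl : (v.getD p.1.toNat []).length = cols := by
      rw [List.getD_eq_getElem v [] hi]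
      exact hrows _ (List.getElem_mem hi)
    show (v.getD p.1.toNat []).getD p.2.toNat 0 = 0
    rw [List.getD_eq_default _ _ (by omega)]
  · show (v.getD p.1.toNat []).getD p.2.toNat 0 = 0
    rw [List.getD_eq_default v _ (by omega), List.getD]
    rfl

-- ---------- the coupling invariant between the level loop and the Jacobi loop ----------
def pvInv (grid : List String) (rows cols : Nat) (front : List (Int × Int))
    (R : List (List Bool)) (vis : List (List Int)) : Prop :=
  pvShape rows cols vis ∧ pvBin vis ∧
  R.length = rows ∧ (∀ r ∈ R, r.length = cols) ∧
  (∀ q, pvInbP rows cols q → q ≠ ((0 : Int), (0 : Int)) →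
    (pvVIv vis q = 1 ↔ pvRI R q = true)) ∧
  pvRI R ((0 : Int), (0 : Int)) = true ∧
  (∀ p ∈ front, pvInbP rows cols p) ∧
  (∀ p ∈ front, pvRI R p = true) ∧
  (∀ q, pvInbP rows cols q → pvRI R q = true → q ∉ front →
    ∀ p ∈ pvNbrsOf q, pvInbP rows cols p → pvNWP grid p → pvRI R p = true) ∧
  (pvRI R ((rows : Int) - 1, (cols : Int) - 1) = true →
    ((rows : Int) - 1, (cols : Int) - 1) ∈ front)

theorem pvMain (grid : List String) (maxTime : Int) (rows cols : Nat)
    (hr : 0 < rows) (hc : 0 < cols) :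
    ∀ (fA : Nat) (fB : Nat) (front : List (Int × Int)) (R : List (List Bool))
      (vis : List (List Int)) (c : Int),
    pvInv grid rows cols front R vis →
    front.length + pvZ vis + 1 ≤ fA → fA ≤ fB →
    pvOuterB grid (rows : Int) (cols : Int) maxTime fA front c vis
      = pvLoopJ grid rows cols maxTime fB R c := by
  intro fA
  induction fA with
  | zero =>
    intro fB front R vis c _ hA _
    omega
  | succ f ih =>
    intro fB front R vis c hInv hA hAB
    obtain ⟨hshape, hbin, hRlen, hRrows, hb, hc0, hd, he1, he2, hg⟩ := hInv
    obtain ⟨fB', rfl⟩ : ∃ fB', fB = fB' + 1 := ⟨fB - 1, by omega⟩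
    have hinb00 : pvInbP rows cols ((0 : Int), (0 : Int)) := by
      refine ⟨?_, ?_, ?_, ?_⟩ <;> dsimp only <;> omega
    have hendRI : pvRI R ((rows : Int) - 1, (cols : Int) - 1) = pvRAt R (rows - 1) (cols - 1) := by
      show pvRAt R ((rows : Int) - 1).toNat ((cols : Int) - 1).toNat = _
      rw [show ((rows : Int) - 1).toNat = rows - 1 by omega,
        show ((cols : Int) - 1).toNat = cols - 1 by omega]
    by_cases hfr : front = []
    · subst hfr
      have hRend : pvRAt R (rows - 1) (cols - 1) = false := by
        cases h : pvRAt R (rows - 1) (cols - 1)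
        · rfl
        · exact absurd (hg (by rw [hendRI]; exact h)) (List.not_mem_nil)
      have hfix : pvStepJ grid rows cols R = R := by
        obtain ⟨SJ1, SJ2⟩ := pvStepJ_shape grid rows cols R
        apply pvExtB rows cols _ _ SJ1 SJ2 hRlen hRrows
        intro i j hi hj
        have hq : pvInbP rows cols ((i : Int), (j : Int)) := by
          refine ⟨?_, ?_, ?_, ?_⟩ <;> dsimp only <;> omega
        have hiff := pvRI_stepJ_iff grid rows cols R ((i : Int), (j : Int)) hq
        rw [pvRI_natCast] at hiff
        apply Bool.eq_iff_iff.mpr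
        constructor
        · intro hT
          rcases hiff.mp hT with h | ⟨hnw, p, hpmem, hpinb, hRp⟩
          · rwa [pvRI_natCast] at h
            -- pvRI R (↑i,↑j) = pvRAt R i j
          · have := he2 p hpinb hRp (List.not_mem_nil) ((i : Int), (j : Int))
              ((pvNbrsOf_symm ((i : Int), (j : Int)) p).mp hpmem) hq hnw
            rwa [pvRI_natCast] at this
        · intro hT
          exact hiff.mpr (Or.inl (by rwa [pvRI_natCast]))
      show pvOuterB grid (rows : Int) (cols : Int) maxTime (f + 1) [] c vis = _
      have hL : pvOuterB grid (rows : Int) (cols : Int) maxTime (f + 1) [] c vis = "No" := by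
        simp [pvOuterB]
      have hRside : pvLoopJ grid rows cols maxTime (fB' + 1) R c = "No" := by
        simp only [pvLoopJ, hRend]
        rw [if_neg (by simp), if_pos hfix]
      rw [hL, hRside]
    · by_cases hendf : ((rows : Int) - 1, (cols : Int) - 1) ∈ front
      · have hRend : pvRAt R (rows - 1) (cols - 1) = true := by
          rw [← hendRI]
          exact he1 _ hendf
        have hinl := pvInner_end grid (rows : Int) (cols : Int) maxTime c front [] vis
          ⟨((rows : Int) - 1, (cols : Int) - 1), hendf, rfl, rfl⟩
        have hL : pvOuterB grid (rows : Int) (cols : Int) maxTime (f + 1) front c vis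
            = (if c ≤ maxTime then "Yes" else "No") := by
          simp only [pvOuterB]
          rw [if_neg hfr, hinl]
        have hRside : pvLoopJ grid rows cols maxTime (fB' + 1) R c
            = (if c ≤ maxTime then "Yes" else "No") := by
          simp [pvLoopJ, hRend]
        rw [hL, hRside]
      · have hRend : pvRAt R (rows - 1) (cols - 1) = false := by
          cases h : pvRAt R (rows - 1) (cols - 1)
          · rfl
          · exact absurd (hg (by rw [hendRI]; exact h)) hendf
        have hendl : ∀ p ∈ front, ¬(p.1 = (rows : Int) - 1 ∧ p.2 = (cols : Int) - 1) := by
          rintro p hp ⟨e1, e2⟩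
          apply hendf
          have hpe : p = ((rows : Int) - 1, (cols : Int) - 1) := Prod.ext_iff.mpr ⟨e1, e2⟩
          rwa [hpe] at hp
        obtain ⟨nf, vf, hinner, hvfshape, hval, hmem, hcnt⟩ :=
          pvInner_char grid rows cols maxTime c front [] vis hshape hendl
        have hcnt0 : nf.length + pvZ vf ≤ pvZ vis := by simpa using hcnt
        have hAstep : pvOuterB grid (rows : Int) (cols : Int) maxTime (f + 1) front c vis
            = pvOuterB grid (rows : Int) (cols : Int) maxTime f nf (c + 1) vf := by
          simp only [pvOuterB]
          rw [if_neg hfr, hinner]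
        have hfl : 1 ≤ front.length := by
          cases front
          · exact absurd rfl hfr
          · simp
        by_cases hfix : pvStepJ grid rows cols R = R
        · have hBNo : pvLoopJ grid rows cols maxTime (fB' + 1) R c = "No" := by
            simp only [pvLoopJ, hRend]
            rw [if_neg (by simp), if_pos hfix]
          rw [hAstep, hBNo]
          have hall : ∀ q ∈ nf, q = ((0 : Int), (0 : Int)) := by
            intro q hq
            rcases (hmem q).mp hq with h0 | hAdd
            · simp at h0
            · obtain ⟨hi2, hnw, hz, p, hp, hmq⟩ := hAdd
              by_contra hq0
              have hRq : pvRI (pvStepJ grid rows cols R) q = true :=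
                (pvRI_stepJ_iff grid rows cols R q hi2).mpr
                  (Or.inr ⟨hnw, p, (pvNbrsOf_symm p q).mp hmq, hd p hp, he1 p hp⟩)
              rw [hfix] at hRq
              have hv1 := (hb q hi2 hq0).mpr hRq
              rw [hv1] at hz
              exact absurd hz (by norm_num)
          cases nf with
          | nil =>
            obtain ⟨f', rfl⟩ : ∃ f', f = f' + 1 := ⟨f - 1, by omega⟩
            simp [pvOuterB]
          | cons q0 qs =>
            have hq00 := hall q0 List.mem_cons_self
            have hz00 : pvVIv vis ((0 : Int), (0 : Int)) = 0 := by
              rcases (hmem q0).mp List.mem_cons_self with h0 | hAdd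
              · simp at h0
              · obtain ⟨_, _, hz, _⟩ := hAdd
                rwa [hq00] at hz
            have hZ1 : 1 ≤ pvZ vis := pvZ_pos rows cols vis ((0 : Int), (0 : Int)) hshape hinb00 hz00
            have hne0 : ¬((0 : Int) = (rows : Int) - 1 ∧ (0 : Int) = (cols : Int) - 1) := by
              rintro ⟨e1, e2⟩
              have h00 : pvRAt R (rows - 1) (cols - 1) = true := by
                rw [← hendRI]
                have : ((rows : Int) - 1, (cols : Int) - 1) = ((0 : Int), (0 : Int)) :=
                  Prod.ext_iff.mpr ⟨e1.symm, e2.symm⟩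
                rw [this]
                exact hc0
              rw [hRend] at h00
              exact absurd h00 (by norm_num)
            apply pvOnlyStart grid rows cols maxTime (c + 1) (q0 :: qs) vf f hall ?_ hne0 (by omega)
            rintro p hp ⟨hinbp, hnwp, hzf⟩
            have hRp' : pvRI (pvStepJ grid rows cols R) p = true :=
              (pvRI_stepJ_iff grid rows cols R p hinbp).mpr
                (Or.inr ⟨hnwp, ((0 : Int), (0 : Int)),
                  (pvNbrsOf_symm ((0 : Int), (0 : Int)) p).mp hp, hinb00, hc0⟩)
            rw [hfix] at hRp'
            have hpne : p ≠ ((0 : Int), (0 : Int)) := pvNbrsOf_ne _ _ hp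
            have hvp : pvVIv vis p = 1 := (hb p hinbp hpne).mpr hRp'
            by_cases hAp : pvAddL grid rows cols vis front p
            · rw [(hval p hinbp).1 hAp] at hzf
              exact absurd hzf (by norm_num)
            · rw [(hval p hinbp).2 hAp, hvp] at hzf
              exact absurd hzf (by norm_num)
        · have hBstep : pvLoopJ grid rows cols maxTime (fB' + 1) R c
              = pvLoopJ grid rows cols maxTime fB' (pvStepJ grid rows cols R) (c + 1) := by
            simp only [pvLoopJ, hRend]
            rw [if_neg (by simp), if_neg hfix]
          rw [hAstep, hBstep]
          obtain ⟨SJ1, SJ2⟩ := pvStepJ_shape grid rows cols R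
          have hbinvf : pvBin vf := by
            intro p
            by_cases hin : p.1.toNat < rows ∧ p.2.toNat < cols
            · have hinb2 : pvInbP rows cols ((p.1.toNat : Int), (p.2.toNat : Int)) := by
                obtain ⟨hin1, hin2⟩ := hin
                refine ⟨?_, ?_, ?_, ?_⟩ <;> dsimp only <;> omega
              have hee : pvVIv vf p = pvVIv vf ((p.1.toNat : Int), (p.2.toNat : Int)) := by
                show (vf.getD p.1.toNat []).getD p.2.toNat 0
                  = (vf.getD ((p.1.toNat : Int)).toNat []).getD ((p.2.toNat : Int)).toNat 0
                rw [Int.toNat_natCast, Int.toNat_natCast]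
              rw [hee]
              by_cases hAq : pvAddL grid rows cols vis front ((p.1.toNat : Int), (p.2.toNat : Int))
              · rw [(hval _ hinb2).1 hAq]
                right; rfl
              · rw [(hval _ hinb2).2 hAq]
                have hee2 : pvVIv vis ((p.1.toNat : Int), (p.2.toNat : Int)) = pvVIv vis p := by
                  show (vis.getD ((p.1.toNat : Int)).toNat []).getD ((p.2.toNat : Int)).toNat 0
                    = (vis.getD p.1.toNat []).getD p.2.toNat 0
                  rw [Int.toNat_natCast, Int.toNat_natCast]
                rw [hee2]
                exact hbin p
            · left
              exact pvVIv_default rows cols vf hvfshape p hin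
          have hc0' : pvRI (pvStepJ grid rows cols R) ((0 : Int), (0 : Int)) = true :=
            (pvRI_stepJ_iff grid rows cols R _ hinb00).mpr (Or.inl hc0)
          have hb' : ∀ q, pvInbP rows cols q → q ≠ ((0 : Int), (0 : Int)) →
              (pvVIv vf q = 1 ↔ pvRI (pvStepJ grid rows cols R) q = true) := by
            intro q hq hq0
            constructor
            · intro hvf
              by_cases hAq : pvAddL grid rows cols vis front q
              · obtain ⟨_, hnw, _, p, hp, hmq⟩ := hAq
                exact (pvRI_stepJ_iff grid rows cols R q hq).mpr
                  (Or.inr ⟨hnw, p, (pvNbrsOf_symm p q).mp hmq, hd p hp, he1 p hp⟩)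
              · rw [(hval q hq).2 hAq] at hvf
                exact (pvRI_stepJ_iff grid rows cols R q hq).mpr
                  (Or.inl ((hb q hq hq0).mp hvf))
            · intro hR'q
              by_cases hRq : pvRI R q = true
              · have hv1 := (hb q hq hq0).mpr hRq
                by_cases hAq : pvAddL grid rows cols vis front q
                · exact (hval q hq).1 hAq
                · rw [(hval q hq).2 hAq]
                  exact hv1
              · rcases (pvRI_stepJ_iff grid rows cols R q hq).mp hR'q with h | ⟨hnwq, p, hpmem, hpinb, hRp⟩
                · exact absurd h hRq
                · have hz : pvVIv vis q = 0 := by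
                    rcases hbin q with h0 | h1
                    · exact h0
                    · exact absurd ((hb q hq hq0).mp h1) hRq
                  have hpf : p ∈ front := by
                    by_contra hpf
                    exact hRq (he2 p hpinb hRp hpf q ((pvNbrsOf_symm q p).mp hpmem) hq hnwq)
                  exact (hval q hq).1 ⟨hq, hnwq, hz, p, hpf, (pvNbrsOf_symm p q).mpr hpmem⟩
          apply ih fB' nf (pvStepJ grid rows cols R) vf (c + 1)
          · refine ⟨hvfshape, hbinvf, SJ1, SJ2, hb', hc0', ?_, ?_, ?_, ?_⟩
            · intro p hp
              rcases (hmem p).mp hp with h0 | hAdd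
              · simp at h0
              · exact hAdd.1
            · intro p hp
              rcases (hmem p).mp hp with h0 | hAdd
              · simp at h0
              · obtain ⟨hi2, hnw, _, w, hw, hmw⟩ := hAdd
                exact (pvRI_stepJ_iff grid rows cols R p hi2).mpr
                  (Or.inr ⟨hnw, w, (pvNbrsOf_symm w p).mp hmw, hd w hw, he1 w hw⟩)
            · intro q hq hR'q hqnf p hpmem hpinb hpnw
              by_cases hRq : pvRI R q = true
              · by_cases hqf : q ∈ front
                · by_cases hp0 : p = ((0 : Int), (0 : Int))
                  · rw [hp0]
                    exact hc0'
                  · apply (hb' p hpinb hp0).mp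
                    by_cases hAp : pvAddL grid rows cols vis front p
                    · exact (hval p hpinb).1 hAp
                    · have hvisp : pvVIv vis p = 1 := by
                        rcases hbin p with h0 | h1
                        · exact absurd ⟨hpinb, hpnw, h0, q, hqf, hpmem⟩ hAp
                        · exact h1
                      rw [(hval p hpinb).2 hAp]
                      exact hvisp
                · exact (pvRI_stepJ_iff grid rows cols R p hpinb).mpr
                    (Or.inl (he2 q hq hRq hqf p hpmem hpinb hpnw))
              · exfalso
                apply hqnf
                rcases (pvRI_stepJ_iff grid rows cols R q hq).mp hR'q with h | ⟨hnwq, w, hwmem, hwinb, hRw⟩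
                · exact absurd h hRq
                · have hq0 : q ≠ ((0 : Int), (0 : Int)) := fun e => hRq (by rw [e]; exact hc0)
                  have hz : pvVIv vis q = 0 := by
                    rcases hbin q with h0 | h1
                    · exact h0
                    · exact absurd ((hb q hq hq0).mp h1) hRq
                  by_cases hwf : w ∈ front
                  · exact (hmem q).mpr (Or.inr ⟨hq, hnwq, hz, w, hwf, (pvNbrsOf_symm w q).mpr hwmem⟩)
                  · exact absurd (he2 w hwinb hRw hwf q ((pvNbrsOf_symm q w).mp hwmem) hq hnwq) hRq
            · intro hR'e
              have hRe : ¬ pvRI R ((rows : Int) - 1, (cols : Int) - 1) = true := by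
                rw [hendRI, hRend]
                simp
              have hinbe : pvInbP rows cols ((rows : Int) - 1, (cols : Int) - 1) := by
                refine ⟨?_, ?_, ?_, ?_⟩ <;> dsimp only <;> omega
              rcases (pvRI_stepJ_iff grid rows cols R _ hinbe).mp hR'e with h | ⟨hnwq, w, hwmem, hwinb, hRw⟩
              · exact absurd h hRe
              · have hq0 : ((rows : Int) - 1, (cols : Int) - 1) ≠ ((0 : Int), (0 : Int)) := by
                  intro e
                  exact hRe (by rw [e]; exact hc0)
                have hz : pvVIv vis ((rows : Int) - 1, (cols : Int) - 1) = 0 := by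
                  rcases hbin ((rows : Int) - 1, (cols : Int) - 1) with h0 | h1
                  · exact h0
                  · exact absurd ((hb _ hinbe hq0).mp h1) hRe
                by_cases hwf : w ∈ front
                · exact (hmem _).mpr (Or.inr ⟨hinbe, hnwq, hz, w, hwf, (pvNbrsOf_symm w _).mpr hwmem⟩)
                · exact absurd (he2 w hwinb hRw hwf _ ((pvNbrsOf_symm _ w).mp hwmem) hinbe hnwq) hRe
          · omega
          · omega

-- ===== VERDICT (by name: the statement is the Claim_ definition above) =====
theorem reachTheEnd_spec : Claim_equal_reachTheEnd := by
  intro grid maxTime _ hpre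
  obtain ⟨hnil, hcpos, _⟩ := hpre
  show reachTheEnd grid maxTime = reachTheEnd_alt grid maxTime
  have hr : 0 < grid.length := by
    cases grid
    · exact absurd rfl hnil
    · simp
  have hvis : (List.range grid.length).map
        (fun _ => (List.range (grid.headD "").length).map (fun _ => (0 : Int)))
      = List.replicate grid.length (List.replicate (grid.headD "").length 0) := by
    simp
  have hbr := pvBridge grid maxTime (grid.length * (grid.headD "").length + 1)
    [((0 : Int), (0 : Int))] (grid.length * (grid.headD "").length + 2) []
    (List.replicate grid.length (List.replicate (grid.headD "").length 0)) 0
    (pvShape_rep _ _)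
    (by rw [pvZ_rep]; simp; omega)
    (by rw [pvZ_rep]; simp)
  have hfront : pvTag 0 [((0 : Int), (0 : Int))] ++ pvTag (0 + 1) ([] : List (Int × Int))
      = [((0 : Int), (0 : Int), (0 : Int))] := by simp [pvTag]
  rw [hfront] at hbr
  have hA : reachTheEnd grid maxTime
      = pvOuterB grid (grid.length : Int) ((grid.headD "").length : Int) maxTime
          (grid.length * (grid.headD "").length + 2) [((0 : Int), (0 : Int))] 0
          (List.replicate grid.length (List.replicate (grid.headD "").length 0)) := by
    simp only [reachTheEnd, hvis]
    rw [hbr]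
    rw [show grid.length * (grid.headD "").length + 2
        = (grid.length * (grid.headD "").length + 1) + 1 from rfl]
    simp only [pvOuterB, pvContB]
    rw [if_neg (by simp)]
  have hR0at : ∀ i j, i < grid.length → j < (grid.headD "").length →
      pvRAt ((List.range grid.length).map (fun i =>
        (List.range (grid.headD "").length).map (fun j => decide (i = 0 ∧ j = 0)))) i j
        = decide (i = 0 ∧ j = 0) :=
    fun i j hi hj => pvRAt_mk _ _ _ i j hi hj
  have hZer : ∀ p, pvVIv (List.replicate grid.length
      (List.replicate (grid.headD "").length (0 : Int))) p = 0 := by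
    intro p
    by_cases hin : p.1.toNat < grid.length ∧ p.2.toNat < (grid.headD "").length
    · show ((List.replicate grid.length (List.replicate (grid.headD "").length (0 : Int))).getD
        p.1.toNat []).getD p.2.toNat 0 = 0
      have h1 : (List.replicate grid.length
            (List.replicate (grid.headD "").length (0 : Int))).getD p.1.toNat []
          = List.replicate (grid.headD "").length (0 : Int) := by
        rw [List.getD_eq_getElem _ _ (by simpa using hin.1), List.getElem_replicate]
      rw [h1, List.getD_eq_getElem _ _ (by simpa using hin.2), List.getElem_replicate]
    · exact pvVIv_default grid.length (grid.headD "").length _ (pvShape_rep _ _) p hin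
  have hRIto : ∀ (X : List (List Bool)) (q : Int × Int),
      pvRI X q = pvRAt X q.1.toNat q.2.toNat := fun X q => rfl
  have hInv0 : pvInv grid grid.length (grid.headD "").length [((0 : Int), (0 : Int))]
      ((List.range grid.length).map (fun i =>
        (List.range (grid.headD "").length).map (fun j => decide (i = 0 ∧ j = 0))))
      (List.replicate grid.length (List.replicate (grid.headD "").length 0)) := by
    have hc0 : pvRI ((List.range grid.length).map (fun i =>
        (List.range (grid.headD "").length).map (fun j => decide (i = 0 ∧ j = 0))))
        ((0 : Int), (0 : Int)) = true := by
      rw [hRIto]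
      show pvRAt ((List.range grid.length).map (fun i =>
        (List.range (grid.headD "").length).map (fun j => decide (i = 0 ∧ j = 0)))) 0 0 = true
      rw [hR0at 0 0 hr hcpos]
      simp
    have honly : ∀ q : Int × Int, pvInbP grid.length (grid.headD "").length q →
        pvRI ((List.range grid.length).map (fun i =>
          (List.range (grid.headD "").length).map (fun j => decide (i = 0 ∧ j = 0)))) q = true →
        q = ((0 : Int), (0 : Int)) := by
      rintro q ⟨h1, h2, h3, h4⟩ hRq
      rw [hRIto, hR0at q.1.toNat q.2.toNat (by omega) (by omega)] at hRq
      simp only [decide_eq_true_eq] at hRq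
      exact Prod.ext_iff.mpr ⟨by omega, by omega⟩
    refine ⟨pvShape_rep _ _, fun p => Or.inl (hZer p), by simp, ?_, ?_, hc0, ?_, ?_, ?_, ?_⟩
    · intro r hrm
      simp only [List.mem_map] at hrm
      obtain ⟨i, _, rfl⟩ := hrm
      simp
    · intro q hq hq0
      constructor
      · intro h1
        rw [hZer q] at h1
        exact absurd h1 (by norm_num)
      · intro hRq
        exact absurd (honly q hq hRq) hq0
    · rintro p hp
      rcases List.mem_singleton.mp hp with rfl
      refine ⟨?_, ?_, ?_, ?_⟩ <;> dsimp only <;> omega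
    · intro p hp
      rcases List.mem_singleton.mp hp with rfl
      exact hc0
    · intro q hq hRq hqf
      exact absurd (by rw [honly q hq hRq]; exact List.mem_singleton.mpr rfl) hqf
    · intro hRe
      have hinbe : pvInbP grid.length (grid.headD "").length
          ((grid.length : Int) - 1, ((grid.headD "").length : Int) - 1) := by
        refine ⟨?_, ?_, ?_, ?_⟩ <;> dsimp only <;> omega
      rw [honly _ hinbe hRe]
      exact List.mem_singleton.mpr rfl
  rw [hA, pvMain grid maxTime grid.length (grid.headD "").length hr hcpos
    (grid.length * (grid.headD "").length + 2) (grid.length * (grid.headD "").length + 2)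
    [((0 : Int), (0 : Int))] _ _ 0 hInv0
    (by rw [pvZ_rep]; simp only [List.length_cons, List.length_nil]; omega) (le_refl _)]
  simp only [reachTheEnd_alt]
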